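-- pv_equiv track=rewrite | github.com/GeonjoonBae/shlib-shenbao-dataset-workflow | shenbao_textdata_preprocess_combine.py | representative_reason
-- ===== SOURCE A (Python) =====
-- ERROR_PREFIX = "[ERROR]"
--
-- def is_error_text(row: dict[str, str]) -> bool:
--     return row.get("text_raw", "").lstrip().startswith(ERROR_PREFIX)
--
-- def text_exists(row: dict[str, str]) -> bool:
--     return bool(row.get("text_raw", "").strip())
--
-- def title_exists(row: dict[str, str]) -> bool:
--     return bool(row.get("title_raw", "").strip())
--
-- def representative_reason(candidates: list[dict[str, str]]) -> tuple[dict[str, str], str]: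
--     remaining = list(candidates)
--     first_reducing_reason = ""
--     criteria = [
--         ("1_no_error", lambda row: not is_error_text(row), True),
--         ("2_text_exists", text_exists, True),
--         ("3_title_exists", title_exists, True),
--         ("4_long_text", lambda row: len(row.get("text_raw", "")), "max"),
--     ]
--
--     for reason, getter, target in criteria:
--         values = [getter(row) for row in remaining]
--         if len(set(values)) <= 1:
--             continue
--         if target == "max":
--             best_value = max(values)
--         else:
--             best_value = target
--         filtered = [row for row in remaining if getter(row) == best_value]
--         if filtered:
--             if len(filtered) < len(remaining) and not first_reducing_reason:
--                 first_reducing_reason = reason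
--             remaining = filtered
--             if len(remaining) == 1:
--                 return remaining[0], first_reducing_reason or reason
--
--     selected = min(remaining, key=lambda row: int(row["preprocess_index"]))
--     return selected, first_reducing_reason or "5_small_index"
-- ===== SOURCE B (Python) =====
-- ERROR_PREFIX = "[ERROR]"
--
-- def is_error_text(row):
--     return row.get("text_raw", "").lstrip().startswith(ERROR_PREFIX)
--
-- def text_exists(row):
--     return bool(row.get("text_raw", "").strip())
--
-- def title_exists(row):
--     return bool(row.get("title_raw", "").strip())
--
-- def representative_reason(candidates):
--     # reason: first criterion whose values are not all identical over the full list
--     crits = [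
--         ("1_no_error", lambda row: not is_error_text(row)),
--         ("2_text_exists", text_exists),
--         ("3_title_exists", title_exists),
--         ("4_long_text", lambda row: len(row.get("text_raw", ""))),
--     ]
--     reason = next((name for name, g in crits
--                    if len({g(row) for row in candidates}) > 1), "5_small_index")
--     # row: keep the rows maximising the composite criteria tuple, then break the tie
--     key4 = lambda row: (not is_error_text(row), text_exists(row),
--                         title_exists(row), len(row.get("text_raw", "")))
--     best = max(key4(row) for row in candidates)
--     remaining = [row for row in candidates if key4(row) == best]
--     if len(remaining) > 1:
--         return min(remaining, key=lambda row: int(row["preprocess_index"])), reason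
--     return remaining[0], reason
-- ===== Notes on version B (the rewrite author's own statement) =====
-- stated objective: simpler
-- what changed: Replaces A's stateful sequential filter-loop with early returns and a first_reducing_reason flag by two independent computations: the reason is the first criterion whose values are not all identical over the full candidate list, and the row is picked by one composite lexicographic max key (no-error, text, title, text length) followed by a min on preprocess_index only when a tie remains.
-- crash fix: On a single-candidate list whose row lacks an int-parseable 'preprocess_index', A raises (KeyError/ValueError) from min's key function while B returns that sole candidate with reason '5_small_index'. — e.g. on representative_reason([[("title_raw", "x")]]): A raises KeyError, B returns ([("title_raw", "x")], "5_small_index")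
import Mathlib
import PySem

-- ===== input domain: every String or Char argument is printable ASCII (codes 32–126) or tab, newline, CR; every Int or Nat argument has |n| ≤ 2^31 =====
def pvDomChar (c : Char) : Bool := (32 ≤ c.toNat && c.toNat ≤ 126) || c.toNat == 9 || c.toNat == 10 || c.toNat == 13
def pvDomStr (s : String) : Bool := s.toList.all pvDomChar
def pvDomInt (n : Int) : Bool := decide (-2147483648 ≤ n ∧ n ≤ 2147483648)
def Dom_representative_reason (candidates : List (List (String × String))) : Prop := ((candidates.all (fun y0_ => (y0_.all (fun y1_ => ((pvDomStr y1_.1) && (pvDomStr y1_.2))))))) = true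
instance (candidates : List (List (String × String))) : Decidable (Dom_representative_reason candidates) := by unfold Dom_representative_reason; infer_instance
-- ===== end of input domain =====

-- B replaces A's stateful sequential filter loop by an independent reason scan plus one
-- composite lexicographic-max selection (objective: simpler decomposition; same cost).

-- ===== PORT A =====
-- shared helpers (the Python module shares is_error_text/text_exists/title_exists and the min lambda too)
def pvERROR_PREFIX : String := "[ERROR]"

def pvGetRaw (row : List (String × String)) (k : String) : String :=
  PySem.Dict.getD (PySem.Dict.mk row) k ""          -- row.get(k, "")

def is_error_text (row : List (String × String)) : Bool :=
  PySem.Str.startswith (PySem.Str.lstrip (pvGetRaw row "text_raw")) pvERROR_PREFIX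

def text_exists (row : List (String × String)) : Bool :=
  decide (PySem.Str.strip (pvGetRaw row "text_raw") ≠ "")     -- bool(s.strip())

def title_exists (row : List (String × String)) : Bool :=
  decide (PySem.Str.strip (pvGetRaw row "title_raw") ≠ "")

-- Python bool encoded as int (False=0 < True=1): exact for ==, max and set() on bools
def pvB2I (b : Bool) : Int := if b then 1 else 0
def pvG1 (row : List (String × String)) : Int := pvB2I (!is_error_text row)
def pvG2 (row : List (String × String)) : Int := pvB2I (text_exists row)
def pvG3 (row : List (String × String)) : Int := pvB2I (title_exists row)
def pvG4 (row : List (String × String)) : Int := PySem.Str.len (pvGetRaw row "text_raw")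

-- int(row["preprocess_index"]): none = KeyError/ValueError
def pvIdxKey (row : List (String × String)) : Option Int :=
  (PySem.Dict.get? (PySem.Dict.mk row) "preprocess_index").bind PySem.Int.ofStr?

-- min(R, key=lambda row: int(row["preprocess_index"])): none exactly where Python raises
def pvMinByIndex (R : List (List (String × String))) : Option (List (String × String)) :=
  if R.all (fun r => (pvIdxKey r).isSome) then
    PySem.List.min? R (fun r => (pvIdxKey r).getD 0)
  else none

-- A's criteria list: (reason, getter encoded into Int, target == "max")
def pvCriteria : List (String × (List (String × String) → Int) × Bool) :=
  [("1_no_error", pvG1, false), ("2_text_exists", pvG2, false),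
   ("3_title_exists", pvG3, false), ("4_long_text", pvG4, true)]

-- A's for-loop: state (remaining, first_reducing_reason); third component true = Python's
-- early `return remaining[0], first_reducing_reason or reason` fired (second component
-- then already holds `first_reducing_reason or reason`)
def pvLoopA : List (String × (List (String × String) → Int) × Bool) →
    List (List (String × String)) → String →
    List (List (String × String)) × String × Bool
  | [], remaining, frr => (remaining, frr, false)
  | (reason, getter, isMax) :: rest, remaining, frr =>
    let values := remaining.map getter
    if (PySem.Set.ofList values).length ≤ 1 then
      pvLoopA rest remaining frr
    else
      let best : Int := if isMax then (PySem.List.max? values (fun v => v)).getD 0 else 1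
      let filtered := remaining.filter (fun r => getter r == best)
      if filtered.isEmpty then pvLoopA rest remaining frr
      else
        let frr' := if filtered.length < remaining.length ∧ frr = "" then reason else frr
        if filtered.length = 1 then
          (filtered, (if frr' = "" then reason else frr'), true)
        else pvLoopA rest filtered frr'

def representative_reason (candidates : List (List (String × String))) : (List (String × String)) × String :=
  let res := pvLoopA pvCriteria candidates ""
  if res.2.2 then (res.1.headD [], res.2.1)
  else
    match pvMinByIndex res.1 with
    | some sel => (sel, if res.2.1 = "" then "5_small_index" else res.2.1)
    | none => ([], "")      -- Python raises here (min of []/bad preprocess_index); excluded by Pre_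

-- ===== PORT B =====
-- the composite key: Python tuple (bool, bool, bool, int), bools encoded as 0/1
def pvKey4 (row : List (String × String)) : Int × Int × Int × Int :=
  (pvG1 row, pvG2 row, pvG3 row, pvG4 row)

-- Python's < on 4-tuples, written out lexicographically (exact: int/bool tuple compare)
def pvLtKey (a b : Int × Int × Int × Int) : Bool :=
  decide (a.1 < b.1 ∨ (a.1 = b.1 ∧ (a.2.1 < b.2.1 ∨ (a.2.1 = b.2.1 ∧
    (a.2.2.1 < b.2.2.1 ∨ (a.2.2.1 = b.2.2.1 ∧ a.2.2.2 < b.2.2.2))))))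

-- max(iterable of tuples): Python's running max keeps the current value on ties
def pvMaxKey4 : List (Int × Int × Int × Int) → Option (Int × Int × Int × Int)
  | [] => none                 -- Python's max([]) raises; excluded by Pre_
  | x :: xs => some (xs.foldl (fun acc y => if pvLtKey acc y then y else acc) x)

def pvCritsB : List (String × (List (String × String) → Int)) :=
  [("1_no_error", pvG1), ("2_text_exists", pvG2), ("3_title_exists", pvG3), ("4_long_text", pvG4)]

def representative_reason_alt (candidates : List (List (String × String))) : (List (String × String)) × String :=
  let reason := ((pvCritsB.find? (fun c =>
      decide (1 < (PySem.Set.ofList (candidates.map c.2)).length))).map (fun c => c.1)).getD "5_small_index"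
  match pvMaxKey4 (candidates.map pvKey4) with
  | none => ([], reason)    -- Python's max([]) raises; excluded by Pre_
  | some best =>
    let remaining := candidates.filter (fun r => decide (pvKey4 r = best))
    if 1 < remaining.length then
      match pvMinByIndex remaining with
      | some sel => (sel, reason)
      | none => ([], reason)   -- Python min raises; excluded by Pre_
    else (remaining.headD [], reason)

-- ===== PRECONDITION & SPEC =====
-- rows of candidates whose composite criteria tuple is maximal (the set the tie-break reads)
def pvMaxRows (candidates : List (List (String × String))) : List (List (String × String)) :=
  candidates.filter (fun r => decide (∀ s ∈ candidates, pvLtKey (pvKey4 r) (pvKey4 s) = false))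

-- Pre_ excludes exactly the inputs where Python A raises: the empty list (min of an empty
-- sequence), and inputs whose tie-break must read preprocess_index (two or more maximal rows,
-- or a single candidate) while some maximal row lacks an int-parseable one.
def Pre_representative_reason (candidates : List (List (String × String))) : Prop :=
  candidates ≠ [] ∧
    ((candidates.length = 1 ∨ 1 < (pvMaxRows candidates).length) →
      ∀ r ∈ pvMaxRows candidates, (pvIdxKey r).isSome)
instance (candidates : List (List (String × String))) : Decidable (Pre_representative_reason candidates) := by
  unfold Pre_representative_reason; infer_instance

def pvWitness_representative_reason : List (List (String × String)) := [[("preprocess_index", "1")]]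

-- On a single-candidate list whose row lacks an int-parseable 'preprocess_index', A raises
-- (KeyError/ValueError) from min's key function while B returns that sole candidate with
-- reason "5_small_index".
def Raises_representative_reason (candidates : List (List (String × String))) : Prop :=
  candidates.length = 1 ∧ ¬ (pvIdxKey (candidates.headD [])).isSome
instance (candidates : List (List (String × String))) : Decidable (Raises_representative_reason candidates) := by
  unfold Raises_representative_reason; infer_instance

def pvRaiseWitness_representative_reason : List (List (String × String)) := [[("title_raw", "x")]]
def pvRaiseWitnessOut_representative_reason : (List (String × String)) × String :=
  ([("title_raw", "x")], "5_small_index")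

def Spec_representative_reason (candidates : List (List (String × String))) (out : (List (String × String)) × String) : Prop := out = representative_reason_alt candidates
instance (candidates : List (List (String × String))) (out : (List (String × String)) × String) : Decidable (Spec_representative_reason candidates out) := by unfold Spec_representative_reason; infer_instance

-- ===== CLAIM (what is proved, stated in full; the proofs are below) =====
def Claim_equal_representative_reason : Prop := ∀ (candidates : List (List (String × String))), Dom_representative_reason candidates → Pre_representative_reason candidates → Spec_representative_reason candidates (representative_reason candidates)
def Claim_raises_representative_reason : Prop := (∀ (candidates : List (List (String × String))), Dom_representative_reason candidates → Raises_representative_reason candidates → ¬ Pre_representative_reason candidates) ∧ (Dom_representative_reason (pvRaiseWitness_representative_reason) ∧ Raises_representative_reason (pvRaiseWitness_representative_reason) ∧ representative_reason_alt (pvRaiseWitness_representative_reason) = pvRaiseWitnessOut_representative_reason)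

-- ===== LEMMAS AND PROOFS =====

-- spec-side single filtering step: keep the rows whose key is maximal
def pvStepG {γ : Type} [LinearOrder γ] (k : List (String × String) → γ)
    (R : List (List (String × String))) : List (List (String × String)) :=
  match PySem.List.max? (R.map k) (fun v => v) with
  | none => R
  | some m => R.filter (fun r => decide (k r = m))

def pvFoldSpec (crits : List (String × (List (String × String) → Int) × Bool))
    (R : List (List (String × String))) : List (List (String × String)) :=
  crits.foldl (fun R c => pvStepG c.2.1 R) R

def pvRS (crits : List (String × (List (String × String) → Int) × Bool))
    (R : List (List (String × String))) : Option (String × (List (String × String) → Int) × Bool) :=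
  crits.find? (fun c => decide (1 < (PySem.Set.ofList (R.map c.2.1)).length))

-- proof-side view of the tuple key inside the nested lexicographic order
def pvEncT (t : Int × Int × Int × Int) : Lex (Int × Lex (Int × Lex (Int × Int))) :=
  toLex (t.1, toLex (t.2.1, toLex (t.2.2.1, t.2.2.2)))

def pvEnc (row : List (String × String)) : Lex (Int × Lex (Int × Lex (Int × Int))) :=
  pvEncT (pvKey4 row)

lemma pvLtKey_eq (a b : Int × Int × Int × Int) :
    pvLtKey a b = decide (pvEncT a < pvEncT b) := by
  unfold pvLtKey pvEncT
  simp only [Prod.Lex.lt_iff, ofLex_toLex]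

lemma pvEncT_inj {a b : Int × Int × Int × Int} (h : pvEncT a = pvEncT b) : a = b := by
  unfold pvEncT at h
  simp only [toLex_inj, Prod.mk.injEq] at h
  obtain ⟨h1, h2, h3, h4⟩ := h
  exact Prod.ext h1 (Prod.ext h2 (Prod.ext h3 h4))

lemma pvMaxKey4_map_enc (l : List (Int × Int × Int × Int)) :
    (pvMaxKey4 l).map pvEncT = PySem.List.max? (l.map pvEncT) (fun v => v) := by
  cases l with
  | nil =>
    have := (PySem.List.max?_eq_none_iff (([] : List (Int × Int × Int × Int)).map pvEncT) (fun v => v)).2 rfl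
    rw [this]; rfl
  | cons x xs =>
    rw [List.map_cons, PySem.List.max?_id_cons, pvMaxKey4, Option.map_some]
    congr 1
    rw [List.foldl_map]
    refine (List.foldl_hom pvEncT ?_).symm
    intro a y
    rw [pvLtKey_eq]
    by_cases hlt : pvEncT a < pvEncT y
    · simp [hlt, max_def_lt]
    · simp [hlt, max_def_lt]

lemma pvSetLenLeOne_iff {α : Type} [DecidableEq α] (l : List α) :
    (PySem.Set.ofList l).length ≤ 1 ↔ ∀ a ∈ l, ∀ b ∈ l, a = b := by
  constructor
  · intro h a ha b hb
    have ha' : a ∈ PySem.Set.ofList l := (PySem.Set.mem_ofList l a).2 ha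
    have hb' : b ∈ PySem.Set.ofList l := (PySem.Set.mem_ofList l b).2 hb
    match hS : PySem.Set.ofList l with
    | [] => rw [hS] at ha'; simp at ha'
    | x :: t =>
      rw [hS] at ha' hb' h
      simp only [List.length_cons] at h
      have ht : t = [] := List.length_eq_zero_iff.1 (by omega)
      subst ht
      simp only [List.mem_singleton] at ha' hb'
      rw [ha', hb']
  · intro h
    match hS : PySem.Set.ofList l with
    | [] => simp
    | [_] => simp
    | x :: y :: t =>
      exfalso
      have hnd := PySem.Set.nodup_ofList l
      rw [hS] at hnd
      rw [List.nodup_cons] at hnd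
      have hxy : x ≠ y := fun he => hnd.1 (he ▸ List.mem_cons_self)
      have hx : x ∈ l := (PySem.Set.mem_ofList l x).1 (by rw [hS]; simp)
      have hy : y ∈ l := (PySem.Set.mem_ofList l y).1 (by rw [hS]; simp)
      exact hxy (h x hx y hy)

lemma pvStepG_eq_self {γ : Type} [LinearOrder γ] (k : List (String × String) → γ)
    (R : List (List (String × String))) (h : ∀ a ∈ R, ∀ b ∈ R, k a = k b) :
    pvStepG k R = R := by
  unfold pvStepG
  cases hm : PySem.List.max? (R.map k) (fun v => v) with
  | none => rfl
  | some m =>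
    have hmem := PySem.List.max?_mem hm
    obtain ⟨b, hbR, hbk⟩ := List.mem_map.1 hmem
    refine List.filter_eq_self.2 ?_
    intro r hr
    simp only [decide_eq_true_eq]
    rw [h r hr b hbR, hbk]

lemma pvStepG_ne_nil {γ : Type} [LinearOrder γ] (k : List (String × String) → γ)
    (R : List (List (String × String))) (h : R ≠ []) : pvStepG k R ≠ [] := by
  unfold pvStepG
  cases hm : PySem.List.max? (R.map k) (fun v => v) with
  | none => exact h
  | some m =>
    have hmem := PySem.List.max?_mem hm
    obtain ⟨b, hbR, hbk⟩ := List.mem_map.1 hmem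
    have : b ∈ R.filter (fun r => decide (k r = m)) :=
      List.mem_filter.2 ⟨hbR, by simp [hbk]⟩
    exact List.ne_nil_of_mem this

lemma pvStepG_singleton {γ : Type} [LinearOrder γ] (k : List (String × String) → γ)
    (a : List (String × String)) : pvStepG k [a] = [a] := by
  unfold pvStepG
  cases hm : PySem.List.max? ([a].map k) (fun v => v) with
  | none =>
    exfalso
    have := (PySem.List.max?_eq_none_iff ([a].map k) (fun v => v)).1 hm
    simp at this
  | some m =>
    have hmem := PySem.List.max?_mem hm
    simp only [List.map_cons, List.map_nil, List.mem_singleton] at hmem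
    subst hmem
    simp

lemma pvFoldSpec_singleton (crits) (S : List (List (String × String))) (hS : S.length = 1) :
    pvFoldSpec crits S = S := by
  obtain ⟨a, rfl⟩ := List.length_eq_one_iff.1 hS
  induction crits with
  | nil => rfl
  | cons c rest ih =>
    unfold pvFoldSpec at *
    simp only [List.foldl_cons, pvStepG_singleton]
    exact ih

lemma pvRS_none_foldSpec (crits) (R : List (List (String × String)))
    (h : pvRS crits R = none) : pvFoldSpec crits R = R := by
  induction crits generalizing R with
  | nil => rfl
  | cons c rest ih =>
    unfold pvRS at h
    rw [List.find?_eq_none] at h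
    have hc := h c (by simp)
    have hrest : pvRS rest R = none := by
      unfold pvRS
      rw [List.find?_eq_none]
      intro x hx
      exact h x (by simp [hx])
    have hstep : pvStepG c.2.1 R = R := by
      apply pvStepG_eq_self
      intro a ha b hb
      have hle : (PySem.Set.ofList (R.map c.2.1)).length ≤ 1 := by
        simp only [decide_eq_true_eq] at hc; omega
      exact (pvSetLenLeOne_iff (R.map c.2.1)).1 hle _ (List.mem_map_of_mem ha)
        _ (List.mem_map_of_mem hb)
    unfold pvFoldSpec at *
    simp only [List.foldl_cons, hstep]
    exact ih R hrest

lemma pvStepG_eq_of_max {γ : Type} [LinearOrder γ] (k : List (String × String) → γ)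
    (R : List (List (String × String))) (m : γ)
    (hm : PySem.List.max? (R.map k) (fun v => v) = some m) :
    pvStepG k R = R.filter (fun r => decide (k r = m)) := by
  unfold pvStepG; rw [hm]

-- lexicographic peel: maximising (f, k) = maximising f, then k among the f-maximisers
lemma pvPeel {γ : Type} [LinearOrder γ] (f : List (String × String) → Int)
    (k : List (String × String) → γ) (R : List (List (String × String))) (h : R ≠ []) :
    pvStepG k (pvStepG f R) = pvStepG (fun r => (toLex (f r, k r) : Lex (Int × γ))) R := by
  cases hm : PySem.List.max? (R.map (fun r => (toLex (f r, k r) : Lex (Int × γ)))) (fun v => v) with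
  | none =>
    exfalso
    have := (PySem.List.max?_eq_none_iff _ _).1 hm
    simp only [List.map_eq_nil_iff] at this
    exact h this
  | some m =>
    obtain ⟨r0, hr0R, hr0⟩ := List.mem_map.1 (PySem.List.max?_mem hm)
    have hmaxF := PySem.List.max?_isMax hm
    have hfst : ∀ r ∈ R, f r ≤ (ofLex m).1 := by
      intro r hr
      have := hmaxF _ (List.mem_map_of_mem hr)
      rcases Prod.Lex.le_iff.1 this with hlt | ⟨he, _⟩
      · exact le_of_lt hlt
      · exact le_of_eq he
    have hr0f : f r0 = (ofLex m).1 := congrArg (fun x => (ofLex x).1) hr0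
    have hr0k : k r0 = (ofLex m).2 := congrArg (fun x => (ofLex x).2) hr0
    -- the max of f over R is m.1
    have hf : PySem.List.max? (R.map f) (fun v => v) = some ((ofLex m).1) := by
      cases hf' : PySem.List.max? (R.map f) (fun v => v) with
      | none =>
        exfalso
        have := (PySem.List.max?_eq_none_iff _ _).1 hf'
        simp only [List.map_eq_nil_iff] at this
        exact h this
      | some m1' =>
        obtain ⟨r1, hr1R, hr1⟩ := List.mem_map.1 (PySem.List.max?_mem hf')
        have h1 : m1' ≤ (ofLex m).1 := hr1 ▸ hfst r1 hr1R
        have h2 : (ofLex m).1 ≤ m1' := hr0f ▸ PySem.List.max?_isMax hf' _ (List.mem_map_of_mem hr0R)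
        rw [le_antisymm h1 h2]
    rw [pvStepG_eq_of_max f R _ hf]
    have hr0R1 : r0 ∈ R.filter (fun r => decide (f r = (ofLex m).1)) :=
      List.mem_filter.2 ⟨hr0R, by simp [hr0f]⟩
    -- the max of k over the f-maximisers is m.2
    have hk : PySem.List.max? ((R.filter (fun r => decide (f r = (ofLex m).1))).map k)
        (fun v => v) = some ((ofLex m).2) := by
      cases hk' : PySem.List.max? ((R.filter (fun r => decide (f r = (ofLex m).1))).map k)
          (fun v => v) with
      | none =>
        exfalso
        have := (PySem.List.max?_eq_none_iff _ _).1 hk'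
        simp only [List.map_eq_nil_iff] at this
        exact List.ne_nil_of_mem hr0R1 this
      | some m2' =>
        obtain ⟨r1, hr1R, hr1⟩ := List.mem_map.1 (PySem.List.max?_mem hk')
        obtain ⟨hr1R', hr1f⟩ := List.mem_filter.1 hr1R
        simp only [decide_eq_true_eq] at hr1f
        have hle : (toLex (f r1, k r1) : Lex (Int × γ)) ≤ m := hmaxF _ (List.mem_map_of_mem hr1R')
        have h1 : m2' ≤ (ofLex m).2 := by
          rcases Prod.Lex.le_iff.1 hle with hlt | ⟨_, hle2⟩
          · exact absurd hlt (by simp [hr1f])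
          · exact hr1 ▸ hle2
        have h2 : (ofLex m).2 ≤ m2' :=
          hr0k ▸ PySem.List.max?_isMax hk' _ (List.mem_map_of_mem hr0R1)
        rw [le_antisymm h1 h2]
    rw [pvStepG_eq_of_max k _ _ hk, pvStepG_eq_of_max _ R m hm, List.filter_filter]
    refine List.filter_congr ?_
    intro r _
    simp only [← Bool.decide_and, decide_eq_decide]
    constructor
    · rintro ⟨h2, h1⟩
      have : ofLex (toLex (f r, k r) : Lex (Int × γ)) = ofLex m := Prod.ext h1 h2
      exact congrArg toLex this
    · intro he
      have h1 := congrArg (fun x => (ofLex x).1) he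
      have h2 := congrArg (fun x => (ofLex x).2) he
      exact ⟨h2, h1⟩

lemma pvFoldSpec_criteria (R : List (List (String × String))) (h : R ≠ []) :
    pvFoldSpec pvCriteria R = pvStepG pvEnc R := by
  have h1 : pvStepG pvG1 R ≠ [] := pvStepG_ne_nil _ _ h
  have h2 : pvStepG pvG2 (pvStepG pvG1 R) ≠ [] := pvStepG_ne_nil _ _ h1
  unfold pvFoldSpec pvCriteria
  simp only [List.foldl_cons, List.foldl_nil]
  rw [pvPeel pvG3 pvG4 _ h2, pvPeel pvG2 _ _ h1, pvPeel pvG1 _ _ h]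
  rfl

-- the master characterisation of A's loop
lemma pvLoopA_spec (crits : List (String × (List (String × String) → Int) × Bool))
    (R : List (List (String × String))) (frr : String) (hR : R ≠ [])
    (hb : ∀ c ∈ crits, c.2.2 = false → ∀ r, c.2.1 r = 0 ∨ c.2.1 r = 1)
    (hn : ∀ c ∈ crits, c.1 ≠ "") :
    pvLoopA crits R frr =
      (pvFoldSpec crits R,
       (if frr = "" then ((pvRS crits R).map (fun c => c.1)).getD "" else frr),
       decide ((pvFoldSpec crits R).length = 1 ∧ (pvRS crits R).isSome)) := by
  induction crits generalizing R frr with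
  | nil =>
    simp only [pvLoopA, pvFoldSpec, List.foldl_nil, pvRS, List.find?_nil]
    refine Prod.ext rfl (Prod.ext ?_ ?_)
    · simp only []
      split <;> simp_all
    · simp
  | cons c rest ih =>
    obtain ⟨reason, getter, isMax⟩ := c
    have hb' : ∀ c ∈ rest, c.2.2 = false → ∀ r, c.2.1 r = 0 ∨ c.2.1 r = 1 :=
      fun c hc => hb c (by simp [hc])
    have hn' : ∀ c ∈ rest, c.1 ≠ "" := fun c hc => hn c (by simp [hc])
    have hreason : reason ≠ "" := hn (reason, getter, isMax) (by simp)
    by_cases hset : (PySem.Set.ofList (R.map getter)).length ≤ 1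
    · -- all values identical: Python `continue`s, the spec step keeps everything
      have hcond : (decide (1 < (PySem.Set.ofList (R.map ((reason, getter, isMax)).2.1)).length)) = false := by
        simp only [decide_eq_false_iff_not, not_lt]; exact hset
      have hstep : pvStepG getter R = R := by
        apply pvStepG_eq_self
        intro a ha b hb
        exact (pvSetLenLeOne_iff (R.map getter)).1 hset _ (List.mem_map_of_mem ha)
          _ (List.mem_map_of_mem hb)
      have hfold : pvFoldSpec ((reason, getter, isMax) :: rest) R = pvFoldSpec rest R := by
        unfold pvFoldSpec; simp only [List.foldl_cons, hstep]
      have hrs : pvRS ((reason, getter, isMax) :: rest) R = pvRS rest R := by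
        unfold pvRS; rw [List.find?_cons_of_neg (by simp [hcond])]
      rw [pvLoopA, if_pos hset, hfold, hrs]
      exact ih R frr hR hb' hn'
    · -- this criterion discriminates
      have hset' : 1 < (PySem.Set.ofList (R.map getter)).length := by omega
      have hdif : ∃ a ∈ R, ∃ b ∈ R, getter a ≠ getter b := by
        by_contra hc
        push_neg at hc
        have : (PySem.Set.ofList (R.map getter)).length ≤ 1 :=
          (pvSetLenLeOne_iff _).2 (by
            intro x hx y hy
            obtain ⟨a, ha, rfl⟩ := List.mem_map.1 hx
            obtain ⟨b, hb2, rfl⟩ := List.mem_map.1 hy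
            exact hc a ha b hb2)
        omega
      cases hm : PySem.List.max? (R.map getter) (fun v => v) with
      | none =>
        exfalso
        have := (PySem.List.max?_eq_none_iff _ _).1 hm
        simp only [List.map_eq_nil_iff] at this
        exact hR this
      | some m =>
      have hbest : (if isMax then (PySem.List.max? (R.map getter) (fun v => v)).getD 0 else 1) = m := by
        cases hMx : isMax with
        | true => rw [hm]; rfl
        | false =>
          have hrange : ∀ r, getter r = 0 ∨ getter r = 1 :=
            hb (reason, getter, isMax) List.mem_cons_self (by simp [hMx])
          obtain ⟨a, ha, b, hb2, hab⟩ := hdif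
          have h1mem : (1 : Int) ∈ R.map getter := by
            rcases hrange a with ha0 | ha1
            · rcases hrange b with hb0 | hb1
              · exact absurd (ha0.trans hb0.symm) hab
              · exact List.mem_map.2 ⟨b, hb2, hb1⟩
            · exact List.mem_map.2 ⟨a, ha, ha1⟩
          have hle : (1 : Int) ≤ m := PySem.List.max?_isMax hm _ h1mem
          obtain ⟨r1, hr1, hr1m⟩ := List.mem_map.1 (PySem.List.max?_mem hm)
          simp only [Bool.false_eq_true, if_false]
          rcases hrange r1 with h0 | h1 <;> omega
      have hfeq : R.filter (fun r => getter r ==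
          (if isMax then (PySem.List.max? (R.map getter) (fun v => v)).getD 0 else 1)) =
          pvStepG getter R := by
        rw [pvStepG_eq_of_max _ _ _ hm]
        refine List.filter_congr ?_
        intro r _
        rw [hbest]
        exact Bool.beq_eq_decide_eq _ _
      have hne : pvStepG getter R ≠ [] := pvStepG_ne_nil _ _ hR
      have hlt : (pvStepG getter R).length < R.length := by
        rw [pvStepG_eq_of_max _ _ _ hm]
        obtain ⟨a, ha, b, hb2, hab⟩ := hdif
        refine List.length_filter_lt_length_iff_exists.2 ?_
        by_cases haM : getter a = m
        · exact ⟨b, hb2, by simp [haM ▸ hab.symm]⟩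
        · exact ⟨a, ha, by simp [haM]⟩
      have hrs : pvRS ((reason, getter, isMax) :: rest) R = some (reason, getter, isMax) := by
        unfold pvRS
        exact List.find?_cons_of_pos (by simpa using hset')
      have hfold : pvFoldSpec ((reason, getter, isMax) :: rest) R = pvFoldSpec rest (pvStepG getter R) := by
        unfold pvFoldSpec; simp only [List.foldl_cons]
      rw [pvLoopA, if_neg hset]
      simp only [hfeq]
      rw [if_neg (by simpa [List.isEmpty_iff] using hne)]
      have hfrr : (if (pvStepG getter R).length < R.length ∧ frr = "" then reason else frr) =
          (if frr = "" then reason else frr) := by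
        by_cases hf : frr = "" <;> simp [hf, hlt]
      rw [hfrr]
      by_cases hlen1 : (pvStepG getter R).length = 1
      · rw [if_pos hlen1, hfold, pvFoldSpec_singleton rest _ hlen1, hrs]
        refine Prod.ext rfl (Prod.ext ?_ ?_)
        · simp only []
          by_cases hf : frr = "" <;> simp [hf, hreason]
        · simp [hlen1]
      · rw [if_neg hlen1, hfold, hrs]
        rw [ih (pvStepG getter R) _ hne hb' hn']
        have hfrr' : (if frr = "" then reason else frr) ≠ "" := by
          by_cases hf : frr = "" <;> simp_all
        refine Prod.ext rfl (Prod.ext ?_ ?_)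
        · simp only [if_neg hfrr']
          by_cases hf : frr = "" <;> simp [hf]
        · simp only [Option.isSome_some, and_true]
          by_cases hL : (pvFoldSpec rest (pvStepG getter R)).length = 1
          · have hsome : (pvRS rest (pvStepG getter R)).isSome := by
              cases hrs' : pvRS rest (pvStepG getter R) with
              | some _ => rfl
              | none =>
                exfalso
                rw [pvRS_none_foldSpec rest _ hrs'] at hL
                exact hlen1 hL
            simp [hL, hsome]
          · simp [hL]


lemma pvMaxRows_eq_stepG (R : List (List (String × String))) (h : R ≠ []) :
    pvMaxRows R = pvStepG pvEnc R := by
  unfold pvMaxRows pvStepG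
  cases hm : PySem.List.max? (R.map pvEnc) (fun v => v) with
  | none =>
    exfalso
    have := (PySem.List.max?_eq_none_iff (R.map pvEnc) (fun v => v)).1 hm
    simp only [List.map_eq_nil_iff] at this
    exact h this
  | some m =>
    have hmem := PySem.List.max?_mem hm
    obtain ⟨b, hbR, hbk⟩ := List.mem_map.1 hmem
    have hmax := PySem.List.max?_isMax hm
    refine List.filter_congr ?_
    intro r hr
    simp only [decide_eq_decide]
    constructor
    · intro hall
      have h1 : pvEnc r ≤ m := hmax _ (List.mem_map_of_mem hr)
      have h2 : m ≤ pvEnc r := by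
        refine hbk ▸ le_of_not_gt (fun hgt => ?_)
        have := hall b hbR
        rw [pvLtKey_eq] at this
        simp only [decide_eq_false_iff_not] at this
        exact this hgt
      exact le_antisymm h1 h2
    · intro he s hs
      rw [pvLtKey_eq]
      simp only [decide_eq_false_iff_not]
      intro hgt
      have hle : pvEnc s ≤ m := hmax _ (List.mem_map_of_mem hs)
      have hgt' : pvEnc r < pvEnc s := hgt
      rw [he] at hgt'
      exact absurd (lt_of_le_of_lt hle hgt') (lt_irrefl _)

lemma pvMinByIndex_isSome (R : List (List (String × String))) (h : R ≠ [])
    (hk : ∀ r ∈ R, (pvIdxKey r).isSome) : ∃ sel, pvMinByIndex R = some sel := by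
  unfold pvMinByIndex
  have hall : R.all (fun r => (pvIdxKey r).isSome) = true :=
    List.all_eq_true.2 (fun r hr => hk r hr)
  rw [if_pos hall]
  cases hmin : PySem.List.min? R (fun r => (pvIdxKey r).getD 0) with
  | none => exact absurd ((PySem.List.min?_eq_none_iff R _).1 hmin) h
  | some sel => exact ⟨sel, rfl⟩

lemma pvRSB_eq (R : List (List (String × String))) :
    (pvCritsB.find? (fun c => decide (1 < (PySem.Set.ofList (R.map c.2)).length))).map (fun c => c.1)
      = (pvRS pvCriteria R).map (fun c => c.1) := by
  unfold pvRS pvCritsB pvCriteria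
  cases h1 : decide (1 < (PySem.Set.ofList (R.map pvG1)).length) with
  | true => simp [List.find?, h1]
  | false =>
    cases h2 : decide (1 < (PySem.Set.ofList (R.map pvG2)).length) with
    | true => simp [List.find?, h1, h2]
    | false =>
      cases h3 : decide (1 < (PySem.Set.ofList (R.map pvG3)).length) with
      | true => simp [List.find?, h1, h2, h3]
      | false =>
        cases h4 : decide (1 < (PySem.Set.ofList (R.map pvG4)).length) with
        | true => simp [List.find?, h1, h2, h3, h4]
        | false => simp [List.find?, h1, h2, h3, h4]

-- ===== VERDICT (by name: the statement is the Claim_ definition above) =====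
lemma pvMinByIndex_mem (R : List (List (String × String))) (sel : List (String × String))
    (h : pvMinByIndex R = some sel) : sel ∈ R := by
  unfold pvMinByIndex at h
  split at h
  · exact PySem.List.min?_mem h
  · cases h

theorem representative_reason_spec : Claim_equal_representative_reason := by
  unfold Claim_equal_representative_reason
  intro candidates _ hpre
  unfold Spec_representative_reason
  obtain ⟨hne, hidx⟩ := hpre
  have hb : ∀ c ∈ pvCriteria, c.2.2 = false → ∀ r, c.2.1 r = 0 ∨ c.2.1 r = 1 := by
    intro c hc hfalse r
    simp only [pvCriteria, List.mem_cons, List.not_mem_nil, or_false] at hc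
    rcases hc with rfl | rfl | rfl | rfl
    · simp only [pvG1, pvB2I]; cases (!is_error_text r) <;> simp
    · simp only [pvG2, pvB2I]; cases text_exists r <;> simp
    · simp only [pvG3, pvB2I]; cases title_exists r <;> simp
    · simp at hfalse
  have hn : ∀ c ∈ pvCriteria, c.1 ≠ "" := by
    intro c hc
    simp only [pvCriteria, List.mem_cons, List.not_mem_nil, or_false] at hc
    rcases hc with rfl | rfl | rfl | rfl <;> simp
  have hloop := pvLoopA_spec pvCriteria candidates "" hne hb hn
  have hfoldc := pvFoldSpec_criteria candidates hne
  have hSne : pvStepG pvEnc candidates ≠ [] := pvStepG_ne_nil _ _ hne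
  have hmaxr := pvMaxRows_eq_stepG candidates hne
  cases hm : pvMaxKey4 (candidates.map pvKey4) with
  | none =>
    exfalso
    cases hc : candidates with
    | nil => exact hne hc
    | cons x xs => rw [hc, List.map_cons, pvMaxKey4] at hm; cases hm
  | some best =>
  have hmE : PySem.List.max? (candidates.map pvEnc) (fun v => v) = some (pvEncT best) := by
    have h1 := pvMaxKey4_map_enc (candidates.map pvKey4)
    rw [hm, Option.map_some, List.map_map] at h1
    exact h1.symm
  have hrem : candidates.filter (fun r => decide (pvKey4 r = best)) = pvStepG pvEnc candidates := by
    rw [pvStepG_eq_of_max _ _ _ hmE]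
    refine List.filter_congr ?_
    intro r _
    simp only [decide_eq_decide]
    exact ⟨fun h => congrArg pvEncT h, fun h => pvEncT_inj h⟩
  unfold representative_reason representative_reason_alt
  simp only [hloop, hfoldc, hm, hrem, pvRSB_eq]
  by_cases h1 : (pvStepG pvEnc candidates).length = 1
  · cases hrs : pvRS pvCriteria candidates with
    | some c =>
      simp [h1]
    | none =>
      have hfold_id : pvFoldSpec pvCriteria candidates = candidates :=
        pvRS_none_foldSpec _ _ hrs
      have hSc : pvStepG pvEnc candidates = candidates := by rw [← hfoldc, hfold_id]
      have hcand : candidates.length = 1 := by rw [← hSc]; exact h1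
      have hkeys : ∀ r ∈ pvStepG pvEnc candidates, (pvIdxKey r).isSome :=
        fun r hr => hidx (Or.inl hcand) r (by rw [hmaxr]; exact hr)
      obtain ⟨sel, hsel⟩ := pvMinByIndex_isSome _ hSne hkeys
      have hselmem := pvMinByIndex_mem _ _ hsel
      obtain ⟨r, rfl⟩ := List.length_eq_one_iff.1 hcand
      rw [hSc] at hsel hselmem ⊢
      simp only [List.mem_singleton] at hselmem
      subst hselmem
      simp [hsel]
  · have hgt : 1 < (pvStepG pvEnc candidates).length := by
      have := List.length_pos_iff.2 hSne
      omega
    have hkeys : ∀ r ∈ pvStepG pvEnc candidates, (pvIdxKey r).isSome :=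
      fun r hr => hidx (Or.inr (by rw [hmaxr]; exact hgt)) r (by rw [hmaxr]; exact hr)
    obtain ⟨sel, hsel⟩ := pvMinByIndex_isSome _ hSne hkeys
    cases hrs : pvRS pvCriteria candidates with
    | none =>
      simp [h1, hsel, hgt]
    | some c =>
      have hcmem : c ∈ pvCriteria := by
        unfold pvRS at hrs
        exact List.mem_of_find?_eq_some hrs
      have hc1 : c.1 ≠ "" := hn c hcmem
      simp [h1, hsel, hgt, hc1]

@[simp] theorem representative_reason_raises : Claim_raises_representative_reason := by
  unfold Claim_raises_representative_reason
  refine ⟨?_, by decide⟩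
  intro candidates _ hrai hpre
  obtain ⟨hlen, hkey⟩ := hrai
  obtain ⟨r, rfl⟩ := List.length_eq_one_iff.1 hlen
  have hmax : pvMaxRows [r] = [r] := by
    unfold pvMaxRows
    simp [pvLtKey]
  have := hpre.2 (Or.inl hlen) r (by rw [hmax]; simp)
  simp only [List.headD_cons] at hkey
  exact hkey this
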